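-- pv_equiv track=rewrite | github.com/BenjaminHamon/DocumentManipulation | Sources/toolkit/benjaminhamon_document_manipulation_toolkit/open_document/odt_writer.py | _collapse_body_elements
-- ===== SOURCE A (Python) =====
-- def _collapse_body_elements(document_as_xml_string: str, indent_for_collapsing: int = 6) -> str:
--     document_as_xml_string_fixed = ""
--     is_body = False
--     is_collapsing = False
--
--     line: str
--     for line in document_as_xml_string.splitlines():
--         line_stripped = line.strip()
--         indent = len(line) - len(line.lstrip())
--
--         if line_stripped == "<office:body>":
--             is_body = True
--         if line_stripped == "</office:body>":
--             is_body = False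
--
--         if is_body:
--             if indent == indent_for_collapsing:
--                 if (line_stripped.startswith("<text:h") or line_stripped.startswith("<text:p")) and not line_stripped.endswith("/>"):
--                     document_as_xml_string_fixed += line
--                     is_collapsing = True
--                     continue
--
--                 if (line_stripped.startswith("</text:h") or line_stripped.startswith("</text:p")):
--                     document_as_xml_string_fixed += line_stripped + "\n"
--                     is_collapsing = False
--                     continue
--
--             if is_collapsing:
--                 document_as_xml_string_fixed += line_stripped
--                 continue
--
--         document_as_xml_string_fixed += line + "\n"
--
--     return document_as_xml_string_fixed
-- ===== SOURCE B (Python) =====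
-- def _collapse_body_elements(document_as_xml_string: str, indent_for_collapsing: int = 6) -> str:
--     lines = document_as_xml_string.splitlines()
--     out = []
--     is_body = False
--     i = 0
--     n = len(lines)
--     while i < n:
--         line = lines[i]
--         stripped = line.strip()
--         if stripped == "<office:body>":
--             is_body = True
--         elif stripped == "</office:body>":
--             is_body = False
--         indent = len(line) - len(line.lstrip())
--         at_level = is_body and indent == indent_for_collapsing
--         if at_level and stripped.startswith(("<text:h", "<text:p")) and not stripped.endswith("/>"):
--             # opening element: emit the raw line, then collapse until its closing tag
--             out.append(line)
--             i += 1
--             while i < n: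
--                 line = lines[i]
--                 stripped = line.strip()
--                 if stripped == "<office:body>":
--                     is_body = True
--                 elif stripped == "</office:body>":
--                     is_body = False
--                 indent = len(line) - len(line.lstrip())
--                 i += 1
--                 if is_body and indent == indent_for_collapsing:
--                     if stripped.startswith(("<text:h", "<text:p")) and not stripped.endswith("/>"):
--                         out.append(line)
--                     elif stripped.startswith(("</text:h", "</text:p")):
--                         out.append(stripped + "\n")
--                         break
--                     else:
--                         out.append(stripped)
--                 elif is_body:
--                     out.append(stripped)
--                 else:
--                     out.append(line + "\n")
--         elif at_level and stripped.startswith(("</text:h", "</text:p")):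
--             out.append(stripped + "\n")
--             i += 1
--         else:
--             out.append(line + "\n")
--             i += 1
--     return "".join(out)
-- ===== Notes on version B (the rewrite author's own statement) =====
-- stated objective: alternative
-- what changed: A's single pass with is_body/is_collapsing flags and string concatenation becomes an explicit index scan with a dedicated inner collapsing loop (mutual recursion in the port) joining collected pieces at the end.
import Mathlib
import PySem

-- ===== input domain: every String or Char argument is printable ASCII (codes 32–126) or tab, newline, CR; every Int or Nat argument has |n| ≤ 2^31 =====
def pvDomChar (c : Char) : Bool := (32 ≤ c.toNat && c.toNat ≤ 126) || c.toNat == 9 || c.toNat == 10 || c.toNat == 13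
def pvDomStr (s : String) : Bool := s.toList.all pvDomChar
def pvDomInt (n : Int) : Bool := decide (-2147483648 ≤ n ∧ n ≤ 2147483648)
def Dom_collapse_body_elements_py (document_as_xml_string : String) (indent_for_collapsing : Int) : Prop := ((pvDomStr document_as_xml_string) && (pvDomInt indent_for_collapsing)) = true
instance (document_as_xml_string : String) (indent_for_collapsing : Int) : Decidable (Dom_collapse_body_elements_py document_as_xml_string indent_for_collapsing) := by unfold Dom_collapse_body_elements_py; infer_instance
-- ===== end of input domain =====

-- B rewrites A's three-flag accumulator loop as an explicit outer scan with an inner collapsing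
-- loop (mutual recursion in the port); same return value, different decomposition (objective: alternative).

-- ===== PORT A =====
-- one loop iteration of A: state = (accumulated string, is_body, is_collapsing)
def pvStepA (k : Int) (st : String × Bool × Bool) (line : String) : String × Bool × Bool :=
  let ls := PySem.Str.strip line
  let indent : Int := PySem.Str.len line - PySem.Str.len (PySem.Str.lstrip line)
  let b1 := if ls == "<office:body>" then true else st.2.1
  let b2 := if ls == "</office:body>" then false else b1
  if b2 then
    if (indent == k) && ((PySem.Str.startswith ls "<text:h" || PySem.Str.startswith ls "<text:p") && !(PySem.Str.endswith ls "/>")) then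
      (st.1 ++ line, b2, true)
    else if (indent == k) && (PySem.Str.startswith ls "</text:h" || PySem.Str.startswith ls "</text:p") then
      (st.1 ++ ls ++ "\n", b2, false)
    else if st.2.2 then
      (st.1 ++ ls, b2, st.2.2)
    else
      (st.1 ++ line ++ "\n", b2, st.2.2)
  else
    (st.1 ++ line ++ "\n", b2, st.2.2)

def collapse_body_elements_py (document_as_xml_string : String) (indent_for_collapsing : Int) : String :=
  ((PySem.Str.splitlines document_as_xml_string).foldl (pvStepA indent_for_collapsing) ("", false, false)).1

-- ===== PORT B =====
mutual
-- outer scan: emit lines verbatim until an opening <text:h/<text:p at the collapse indent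
def pvOuterB (k : Int) : List String → Bool → String
  | [], _ => ""
  | line :: rest, isBody =>
    let stripped := PySem.Str.strip line
    let isBody := if stripped == "<office:body>" then true
                  else if stripped == "</office:body>" then false
                  else isBody
    let indent : Int := PySem.Str.len line - PySem.Str.len (PySem.Str.lstrip line)
    let atLevel := isBody && (indent == k)
    if atLevel && ((PySem.Str.startswith stripped "<text:h" || PySem.Str.startswith stripped "<text:p") && !(PySem.Str.endswith stripped "/>")) then
      line ++ pvInnerB k rest isBody
    else if atLevel && (PySem.Str.startswith stripped "</text:h" || PySem.Str.startswith stripped "</text:p") then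
      stripped ++ "\n" ++ pvOuterB k rest isBody
    else
      line ++ "\n" ++ pvOuterB k rest isBody

-- inner collapsing loop: append stripped lines until the closing </text:h/</text:p at the indent
def pvInnerB (k : Int) : List String → Bool → String
  | [], _ => ""
  | line :: rest, isBody =>
    let stripped := PySem.Str.strip line
    let isBody := if stripped == "<office:body>" then true
                  else if stripped == "</office:body>" then false
                  else isBody
    let indent : Int := PySem.Str.len line - PySem.Str.len (PySem.Str.lstrip line)
    if isBody && (indent == k) then
      if (PySem.Str.startswith stripped "<text:h" || PySem.Str.startswith stripped "<text:p") && !(PySem.Str.endswith stripped "/>") then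
        line ++ pvInnerB k rest isBody
      else if PySem.Str.startswith stripped "</text:h" || PySem.Str.startswith stripped "</text:p" then
        stripped ++ "\n" ++ pvOuterB k rest isBody
      else
        stripped ++ pvInnerB k rest isBody
    else if isBody then
      stripped ++ pvInnerB k rest isBody
    else
      line ++ "\n" ++ pvInnerB k rest isBody
end

def collapse_body_elements_py_alt (document_as_xml_string : String) (indent_for_collapsing : Int) : String :=
  pvOuterB indent_for_collapsing (PySem.Str.splitlines document_as_xml_string) false

-- ===== PRECONDITION & SPEC =====
def Spec_collapse_body_elements_py (document_as_xml_string : String) (indent_for_collapsing : Int) (out : String) : Prop := out = collapse_body_elements_py_alt document_as_xml_string indent_for_collapsing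
instance (document_as_xml_string : String) (indent_for_collapsing : Int) (out : String) : Decidable (Spec_collapse_body_elements_py document_as_xml_string indent_for_collapsing out) := by unfold Spec_collapse_body_elements_py; infer_instance

-- ===== CLAIM (what is proved, stated in full; the proofs are below) =====
def Claim_equal_collapse_body_elements_py : Prop := ∀ (document_as_xml_string : String) (indent_for_collapsing : Int), Dom_collapse_body_elements_py document_as_xml_string indent_for_collapsing → Spec_collapse_body_elements_py document_as_xml_string indent_for_collapsing (collapse_body_elements_py document_as_xml_string indent_for_collapsing)

-- ===== LEMMAS AND PROOFS =====

-- the loop invariant: folding A's step from (acc, b, collapsing?) equals acc ++ the matching B phase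
lemma pv_fold_eq (k : Int) (lines : List String) : ∀ (b : Bool) (acc : String),
    (lines.foldl (pvStepA k) (acc, b, false)).1 = acc ++ pvOuterB k lines b
    ∧ (lines.foldl (pvStepA k) (acc, b, true)).1 = acc ++ pvInnerB k lines b := by
  induction lines with
  | nil => intro b acc; simp [pvOuterB, pvInnerB]
  | cons line rest ih =>
    intro b acc
    have ih1 : ∀ b acc, (List.foldl (pvStepA k) (acc, b, false) rest).1 = acc ++ pvOuterB k rest b :=
      fun b acc => (ih b acc).1
    have ih2 : ∀ b acc, (List.foldl (pvStepA k) (acc, b, true) rest).1 = acc ++ pvInnerB k rest b :=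
      fun b acc => (ih b acc).2
    simp only [List.foldl_cons, pvStepA, pvOuterB, pvInnerB]
    generalize (PySem.Str.strip line) = ls
    generalize (PySem.Str.len line - PySem.Str.len (PySem.Str.lstrip line) : Int) = ind
    cases hc1 : (ls == "<office:body>") <;> cases hc2 : (ls == "</office:body>") <;>
      first
      | (rw [eq_of_beq hc1] at hc2; exact absurd hc2 (by decide))
      | (cases b <;> cases hc3 : (ind == k) <;>
         cases hsh : PySem.Str.startswith ls "<text:h" <;>
         cases hsp : PySem.Str.startswith ls "<text:p" <;>
         cases hse : PySem.Str.endswith ls "/>" <;>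
         cases hch : PySem.Str.startswith ls "</text:h" <;>
         cases hcp : PySem.Str.startswith ls "</text:p" <;>
         simp [ih1, ih2, String.append_assoc])

-- ===== VERDICT (by name: the statement is the Claim_ definition above) =====
theorem collapse_body_elements_py_spec : Claim_equal_collapse_body_elements_py := by
  intro s k _
  unfold Spec_collapse_body_elements_py collapse_body_elements_py collapse_body_elements_py_alt
  simpa using (pv_fold_eq k (PySem.Str.splitlines s) false "").1
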